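-- pv_equiv track=rewrite | github.com/Sewadius/codewars_py | 8 kyu/Lists/Flick Switch.py | flick_switch
-- ===== SOURCE A (Python) =====
-- def flick_switch(words: list) -> list:
--     result = []
--     value = True
--     for word in words:
--         if word == 'flick':
--             value = not value
--         result.append(value)
--     return result
-- ===== SOURCE B (Python) =====
-- def flick_switch(words: list) -> list:
--     out = []
--     state = True
--     start = 0
--     while True:
--         try:
--             i = words.index('flick', start)
--         except ValueError:
--             out += [state] * (len(words) - start)
--             return out
--         out += [state] * (i - start) + [not state]
--         state = not state
--         start = i + 1
-- ===== Notes on version B (the rewrite author's own statement) =====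
-- stated objective: alternative
-- what changed: Replaces the per-element boolean-toggle loop with a run-based algorithm: jump from one 'flick' to the next with list.index(x, start) and emit each constant run at once via list replication.
import Mathlib
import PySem

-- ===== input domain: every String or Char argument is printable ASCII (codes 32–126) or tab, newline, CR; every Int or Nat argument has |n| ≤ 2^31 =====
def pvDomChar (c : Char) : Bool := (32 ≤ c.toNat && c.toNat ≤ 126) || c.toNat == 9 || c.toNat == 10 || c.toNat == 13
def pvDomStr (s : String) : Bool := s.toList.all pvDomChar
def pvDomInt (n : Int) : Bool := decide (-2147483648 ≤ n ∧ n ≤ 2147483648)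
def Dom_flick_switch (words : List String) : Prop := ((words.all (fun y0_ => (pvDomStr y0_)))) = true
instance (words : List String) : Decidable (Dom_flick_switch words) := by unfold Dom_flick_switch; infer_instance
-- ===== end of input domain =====

-- B replaces the per-element toggle loop with a run-based algorithm: jump between 'flick'
-- positions via list.index(x, start) and emit each constant run at once (alternative, same cost).

-- ===== PORT A =====
-- A's loop: value toggles on 'flick', each step's value is appended
def flickLoop : List String → Bool → List Bool
  | [], _ => []
  | w :: ws, value =>
      let value' := if w == "flick" then !value else value
      value' :: flickLoop ws value'

def flick_switch (words : List String) : List Bool := flickLoop words true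

-- ===== PORT B =====
-- Source B's while loop; `words.index('flick', start)` searches words[start:], which is exactly
-- `PySem.List.index? (words.drop start) "flick"` shifted by `start` (the except-branch is the
-- `none` case).  Each iteration emits the constant run up to the next flick.
def flickRuns (words : List String) (state : Bool) (start : Nat) : List Bool :=
  match h : PySem.List.index? (words.drop start) "flick" with
  | none => List.replicate (words.length - start) state
  | some j =>
      -- Python's  i = words.index('flick', start)  is start + j here
      List.replicate ((start + j) - start) state ++ [!state] ++ flickRuns words (!state) ((start + j) + 1)
termination_by words.length - start
decreasing_by
  have hj : j < (words.drop start).length := by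
    rcases PySem.List.getElem_of_index?_eq_some h with ⟨hk, _, _⟩
    exact hk
  simp [List.length_drop] at hj
  omega

def flick_switch_alt (words : List String) : List Bool := flickRuns words true 0

-- ===== PRECONDITION & SPEC =====
def Spec_flick_switch (words : List String) (out : List Bool) : Prop := out = flick_switch_alt words
instance (words : List String) (out : List Bool) : Decidable (Spec_flick_switch words out) := by
  unfold Spec_flick_switch; infer_instance

-- ===== CLAIM =====
def Claim_equal_flick_switch : Prop :=
  ∀ (words : List String), Dom_flick_switch words → Spec_flick_switch words (flick_switch words)

-- ===== LEMMAS AND PROOFS =====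
theorem flickLoop_no_flick (ws : List String) (h : "flick" ∉ ws) (v : Bool) :
    flickLoop ws v = List.replicate ws.length v := by
  induction ws with
  | nil => rfl
  | cons w ws ih =>
    simp only [List.mem_cons, not_or] at h
    have hw : (w == "flick") = false := by
      simp [beq_eq_false_iff_ne]; exact fun e => h.1 e.symm
    simp [flickLoop, hw, ih h.2, List.replicate_succ]

theorem flickLoop_prefix (pre rest : List String) (h : "flick" ∉ pre) (v : Bool) :
    flickLoop (pre ++ rest) v = List.replicate pre.length v ++ flickLoop rest v := by
  induction pre with
  | nil => rfl
  | cons w ws ih =>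
    simp only [List.mem_cons, not_or] at h
    have hw : (w == "flick") = false := by
      simp [beq_eq_false_iff_ne]; exact fun e => h.1 e.symm
    simp [flickLoop, hw, ih h.2, List.replicate_succ]

theorem flickRuns_eq (n : Nat) : ∀ (words : List String) (state : Bool) (start : Nat),
    words.length - start ≤ n →
    flickRuns words state start = flickLoop (words.drop start) state := by
  induction n with
  | zero =>
    intro words state start hle
    have hd : words.drop start = [] := by
      apply List.eq_nil_of_length_eq_zero; simp; omega
    rw [flickRuns]
    split
    · rw [hd]
      simp [flickLoop, List.replicate_eq_nil_iff]
      omega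
    · next j hidx =>
        rw [hd] at hidx
        simp [PySem.List.index?] at hidx
  | succ n ih =>
    intro words state start hle
    rw [flickRuns]
    split
    · next hidx =>
        have hni : "flick" ∉ words.drop start := by
          rw [← PySem.List.index?_eq_none_iff]; exact hidx
        rw [flickLoop_no_flick _ hni]
        simp
    · next j hidx =>
        rw [PySem.List.index?_eq_some_iff] at hidx
        rcases hidx with ⟨pre, suf, hsplit, hlen, hnot⟩
        subst hlen
        have hlensplit : pre.length < words.length - start := by
          have h1 : (words.drop start).length = pre.length + 1 + suf.length := by
            rw [hsplit]; simp; omega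
          simp only [List.length_drop] at h1
          omega
        have hdrop : words.drop (start + pre.length + 1) = suf := by
          have h2 : List.drop (pre.length + 1) (words.drop start) = suf := by
            rw [hsplit]; simp
          rw [← h2, List.drop_drop]
          congr 1
        rw [ih words (!state) (start + pre.length + 1) (by omega)]
        rw [hdrop, hsplit, flickLoop_prefix _ _ hnot]
        have hfl : ("flick" == "flick") = true := by decide
        simp only [flickLoop, hfl, if_pos]
        simp [List.append_assoc]

-- ===== VERDICT =====
theorem flick_switch_spec : Claim_equal_flick_switch := by
  intro words _
  unfold Spec_flick_switch flick_switch flick_switch_alt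
  rw [flickRuns_eq words.length words true 0 (by omega)]
  simp
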